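-- pv_equiv track=rewrite | github.com/AlifSrSE/ProblemSolves | 2020C-bitwiseBalancing.py | solve
-- ===== SOURCE A (Python) =====
-- BIT_NUM = 61
--
-- def find_bit(b_bit, c_bit, d_bit):
--     for bit in range(2):
--         if (bit | b_bit) - (bit & c_bit) == d_bit:
--             return bit
--     return -1
--
-- def solve(b, c, d):
--     result = 0
--     for i in range(BIT_NUM):
--         b_bit = (b >> i) & 1
--         c_bit = (c >> i) & 1
--         d_bit = (d >> i) & 1
--         bit = find_bit(b_bit, c_bit, d_bit)
--         if bit == -1:
--             return -1
--         result += bit << i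
--     return result
-- ===== SOURCE B (Python) =====
-- BIT_NUM = 61
--
-- def solve(b, c, d):
--     # Closed form: per bit, a-bit is 0 when b==d, 1 when b!=d and b==c,
--     # impossible when b!=d and b!=c.  So over the low 61 bits the answer
--     # is (b^d) and the input is unsolvable iff (b^d)&(b^c) has a set bit.
--     mask = (1 << BIT_NUM) - 1
--     b &= mask
--     c &= mask
--     d &= mask
--     x = b ^ d
--     y = b ^ c
--     if x & y:
--         return -1
--     return x
-- ===== Notes on version B (the rewrite author's own statement) =====
-- stated objective: simpler
-- what changed: Replaces the per-bit search loop (61 iterations, each trying a in {0,1}) by a single closed-form bitwise computation: answer = (b^d) on the low 61 bits, unsolvable iff (b^d)&(b^c) != 0.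
import Mathlib
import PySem

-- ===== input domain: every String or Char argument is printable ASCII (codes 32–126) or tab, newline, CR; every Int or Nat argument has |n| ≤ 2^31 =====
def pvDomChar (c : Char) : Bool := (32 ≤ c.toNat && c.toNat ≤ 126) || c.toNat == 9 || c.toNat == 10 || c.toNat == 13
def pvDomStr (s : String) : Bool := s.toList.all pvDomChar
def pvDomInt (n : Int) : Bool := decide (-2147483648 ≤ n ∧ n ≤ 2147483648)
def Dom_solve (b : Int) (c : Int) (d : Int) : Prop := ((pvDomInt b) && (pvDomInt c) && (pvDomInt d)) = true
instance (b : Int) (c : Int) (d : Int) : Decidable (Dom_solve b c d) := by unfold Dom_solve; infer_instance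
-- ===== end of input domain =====

-- B replaces A's 61-iteration per-bit search by one closed-form bitwise computation (objective: simpler).

-- ===== PORT A =====
def BIT_NUM : Nat := 61

def find_bit_go (b_bit c_bit d_bit : Int) : List Int → Int
  | [] => -1
  | bit :: rest =>
      if (PySem.Int.bor bit b_bit) - (PySem.Int.band bit c_bit) = d_bit then bit
      else find_bit_go b_bit c_bit d_bit rest

def find_bit (b_bit c_bit d_bit : Int) : Int :=
  find_bit_go b_bit c_bit d_bit (PySem.List.pyRange 0 2 1)

def solve_go (b c d : Int) : List Nat → Int → Int
  | [], result => result
  | i :: rest, result =>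
      let b_bit := PySem.Int.band (b >>> i) 1
      let c_bit := PySem.Int.band (c >>> i) 1
      let d_bit := PySem.Int.band (d >>> i) 1
      let bit := find_bit b_bit c_bit d_bit
      if bit = -1 then -1
      else solve_go b c d rest (result + bit <<< i)

def solve (b : Int) (c : Int) (d : Int) : Int :=
  solve_go b c d (List.range BIT_NUM) 0

-- ===== PORT B =====
def solve_alt (b : Int) (c : Int) (d : Int) : Int :=
  let mask : Int := (1 <<< BIT_NUM) - 1
  let b := PySem.Int.band b mask
  let c := PySem.Int.band c mask
  let d := PySem.Int.band d mask
  let x := PySem.Int.bxor b d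
  let y := PySem.Int.bxor b c
  if PySem.Int.band x y ≠ 0 then -1 else x

-- ===== PRECONDITION & SPEC =====
def Spec_solve (b : Int) (c : Int) (d : Int) (out : Int) : Prop := out = solve_alt b c d
instance (b : Int) (c : Int) (d : Int) (out : Int) : Decidable (Spec_solve b c d out) := by unfold Spec_solve; infer_instance

-- ===== CLAIM (what is proved, stated in full; the proofs are below) =====
def Claim_equal_solve : Prop := ∀ (b : Int) (c : Int) (d : Int), Dom_solve b c d → Spec_solve b c d (solve b c d)

-- ===== LEMMAS AND PROOFS =====

-- Python's `a & ((1<<n)-1)` is `a mod 2^n`, for every integer a (also negative).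
theorem band_mask (a : Int) (n : Nat) :
    PySem.Int.band a ((2:Int)^n - 1) = a % 2^n := by
  have hP : (0:Int) < 2^n := by positivity
  have hmt : ((2:Int)^n - 1).toNat = 2^n - 1 := by
    have : ((2:Int)^n) = ((2^n : Nat) : Int) := by push_cast; ring
    omega
  by_cases ha : 0 ≤ a
  · rw [PySem.Int.band, if_pos ha, if_pos (by omega)]
    rw [hmt, Nat.and_two_pow_sub_one_eq_mod]
    have h1 : ((a.toNat % 2^n : Nat) : Int) = (a.toNat : Int) % ((2^n : Nat) : Int) := by
      push_cast; ring
    rw [h1, Int.toNat_of_nonneg ha]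
    push_cast; ring
  · rw [PySem.Int.band, if_neg ha, if_pos (by omega)]
    rw [hmt, Nat.and_comm, Nat.and_two_pow_sub_one_eq_mod]
    set m : Nat := (-a - 1).toNat with hm
    have hma : (m : Int) = -a - 1 := by omega
    have hmod : (m % 2^n : Nat) < 2^n := Nat.mod_lt _ (by positivity)
    have hcast : ((2^n - 1 - m % 2^n : Nat) : Int) = 2^n - 1 - ((m % 2^n : Nat) : Int) := by
      omega
    rw [hcast]
    have hmm : ((m % 2^n : Nat) : Int) = (m : Int) % 2^n := by push_cast; ring
    have ha' : a = -(m:Int) - 1 := by omega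
    rw [hmm, ha']
    have h2 : -(m:Int) - 1 = (2^n - 1 - (m:Int) % 2^n) - 2^n * ((m:Int) / 2^n + 1) := by
      rw [mul_add, mul_one]
      have := Int.emod_add_mul_ediv (m:Int) (2^n)
      linarith
    have h0 : 0 ≤ (m:Int) % 2^n := Int.emod_nonneg _ (by omega)
    have h3 : ((m:Int) % 2^n) < 2^n := Int.emod_lt_of_pos _ hP
    have h4 : (2^n - 1 - (m:Int) % 2^n) % 2^n = 2^n - 1 - (m:Int) % 2^n :=
      Int.emod_eq_of_lt (by omega) (by omega)
    rw [h2, Int.sub_mul_emod_self_left, h4]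

theorem band_shift_one (a : Int) (i : Nat) (h : i < 61) :
    PySem.Int.band (a >>> i) 1 = (((a % 2^61).toNat / 2^i % 2 : Nat) : Int) := by
  rw [PySem.Int.band_one]
  show Int.fmod (a >>> i) 2 = _
  rw [Int.fmod_eq_emod, if_pos (Or.inl (by norm_num)), add_zero]
  have hs : a >>> i = a / 2^i := by rw [Int.shiftRight_eq_div_pow]; push_cast; ring
  rw [hs]
  have hP : (0:Int) < 2^61 := by positivity
  have hr0 : 0 ≤ a % 2^61 := Int.emod_nonneg _ (by norm_num)
  set r : Nat := (a % 2^61).toNat with hrdef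
  have hr : ((r:Nat):Int) = a % 2^61 := Int.toNat_of_nonneg hr0
  have hcast : ((r / 2^i % 2 : Nat) : Int) = ((r:Int) / 2^i) % 2 := by
    rw [Int.natCast_mod, Int.natCast_div]; push_cast; ring
  rw [hcast, hr]
  have hsplit : (2:Int)^61 = 2^i * 2^(61 - i) := by
    rw [← pow_add]; congr 1; omega
  have hq := Int.mul_ediv_add_emod a (2^61)
  have ha : a = a % 2^61 + 2^i * (2^(61-i) * (a / 2^61)) := by
    rw [← mul_assoc, ← hsplit]; linarith
  have hdiv : a / 2^i = (a % 2^61) / 2^i + 2^(61-i) * (a / 2^61) := by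
    conv_lhs => rw [ha]
    rw [Int.add_mul_ediv_left _ _ (by positivity)]
  rw [hdiv]
  have h61 : 61 - i = (61 - i - 1) + 1 := by omega
  have hpow : (2:Int)^(61-i) = 2 * 2^(61-i-1) := by
    conv_lhs => rw [h61]
    rw [pow_succ]; ring
  rw [hpow, mul_assoc, Int.add_mul_emod_self_left]

theorem nat_bit_div_mod (z : Nat) (i : Nat) :
    z / 2^i % 2 = if z.testBit i then 1 else 0 := by
  have := Nat.mod_lt (z / 2^i) (y := 2) (by norm_num)
  simp only [Nat.testBit, Nat.shiftRight_eq_div_pow, Nat.and_comm 1, Nat.and_one_is_mod]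
  split <;> rename_i h <;> simp at h <;> omega

theorem xor_bit (x y : Nat) (i : Nat) :
    (x ^^^ y) / 2^i % 2 = if x / 2^i % 2 = y / 2^i % 2 then 0 else 1 := by
  rw [nat_bit_div_mod, nat_bit_div_mod, nat_bit_div_mod, Nat.testBit_xor]
  cases hx : x.testBit i <;> cases hy : y.testBit i <;> simp

theorem and_bit (x y : Nat) (i : Nat) :
    (x &&& y) / 2^i % 2 = (x / 2^i % 2) * (y / 2^i % 2) := by
  rw [nat_bit_div_mod, nat_bit_div_mod, nat_bit_div_mod, Nat.testBit_and]
  cases hx : x.testBit i <;> cases hy : y.testBit i <;> simp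


theorem find_bit_eq (bb cb db : Nat) (h1 : bb < 2) (h2 : cb < 2) (h3 : db < 2) :
    find_bit ↑bb ↑cb ↑db = if bb = db then 0 else if cb = bb then (1:Int) else -1 := by
  interval_cases bb <;> interval_cases cb <;> interval_cases db <;> decide

-- the main loop invariant: A's loop over bits s..s+n-1 computes the masked closed form

-- A's loop over bits s..s+n-1 computes the masked closed form
theorem loop_eq (b c d : Int) (B C D : Nat)
    (hb : ∀ i : Nat, i < 61 → PySem.Int.band (b >>> i) 1 = ((B / 2^i % 2 : Nat) : Int))
    (hc : ∀ i : Nat, i < 61 → PySem.Int.band (c >>> i) 1 = ((C / 2^i % 2 : Nat) : Int))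
    (hd : ∀ i : Nat, i < 61 → PySem.Int.band (d >>> i) 1 = ((D / 2^i % 2 : Nat) : Int)) :
    ∀ (n s : Nat), s + n ≤ 61 → ∀ result : Int,
    solve_go b c d (List.range' s n) result =
      if ((B ^^^ D) &&& (B ^^^ C)) / 2^s % 2^n = 0
      then result + (((B ^^^ D) / 2^s % 2^n : Nat) : Int) * 2^s
      else -1 := by
  intro n
  induction n with
  | zero =>
      intro s hs result
      simp [List.range', solve_go, Nat.mod_one]
  | succ n ih =>
      intro s hs result
      have hs61 : s < 61 := by omega
      have hshift : ∀ z : Int, z <<< s = z * 2^s := fun z => by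
        rw [← Int.shiftLeft_natCast_right, Int.shiftLeft_eq_mul_pow]; push_cast; ring
      have hds : ∀ z : Nat, z / 2^s / 2 = z / 2^(s+1) := fun z => by
        rw [Nat.div_div_eq_div_mul, pow_succ]
      have hmm : ∀ z : Nat, z / 2^s % 2^(n+1) = z / 2^s % 2 + 2 * (z / 2^(s+1) % 2^n) := fun z => by
        rw [← hds, show (2:Nat)^(n+1) = 2 * 2^n from by rw [pow_succ, Nat.mul_comm]]
        exact Nat.mod_mul
      rw [List.range'_succ]
      simp only [solve_go]
      rw [hb s hs61, hc s hs61, hd s hs61,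
          find_bit_eq _ _ _ (Nat.mod_lt _ (by norm_num)) (Nat.mod_lt _ (by norm_num))
            (Nat.mod_lt _ (by norm_num))]
      have hxb := xor_bit B D s
      have hyb := xor_bit B C s
      have hzb := and_bit (B ^^^ D) (B ^^^ C) s
      rw [hmm ((B ^^^ D) &&& (B ^^^ C)), hmm (B ^^^ D)]
      by_cases hbd : B / 2^s % 2 = D / 2^s % 2
      · rw [if_pos hbd, if_neg (by norm_num)]
        rw [ih (s+1) (by omega) (result + (0:Int) <<< s)]
        rw [hshift]
        have hx0 : (B ^^^ D) / 2^s % 2 = 0 := by rw [hxb, if_pos hbd]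
        have hz0 : ((B ^^^ D) &&& (B ^^^ C)) / 2^s % 2 = 0 := by rw [hzb, hx0]; ring
        rw [hx0, hz0]
        by_cases ht : ((B ^^^ D) &&& (B ^^^ C)) / 2^(s+1) % 2^n = 0
        · rw [if_pos ht, if_pos (by omega)]
          push_cast
          ring
        · rw [if_neg ht, if_neg (by omega)]
      · rw [if_neg hbd]
        by_cases hcb : C / 2^s % 2 = B / 2^s % 2
        · rw [if_pos hcb, if_neg (by norm_num)]
          rw [ih (s+1) (by omega) (result + (1:Int) <<< s)]
          rw [hshift]
          have hx1 : (B ^^^ D) / 2^s % 2 = 1 := by rw [hxb, if_neg hbd]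
          have hy0 : (B ^^^ C) / 2^s % 2 = 0 := by rw [hyb, if_pos (hcb.symm)]
          have hz0 : ((B ^^^ D) &&& (B ^^^ C)) / 2^s % 2 = 0 := by rw [hzb, hy0]; ring
          rw [hx1, hz0]
          by_cases ht : ((B ^^^ D) &&& (B ^^^ C)) / 2^(s+1) % 2^n = 0
          · rw [if_pos ht, if_pos (by omega)]
            push_cast
            ring
          · rw [if_neg ht, if_neg (by omega)]
        · rw [if_neg hcb, if_pos rfl]
          have hx1 : (B ^^^ D) / 2^s % 2 = 1 := by rw [hxb, if_neg hbd]
          have hy1 : (B ^^^ C) / 2^s % 2 = 1 := by rw [hyb, if_neg (fun h => hcb h.symm)]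
          have hz1 : ((B ^^^ D) &&& (B ^^^ C)) / 2^s % 2 = 1 := by rw [hzb, hx1, hy1]
          rw [hz1, if_neg (by omega)]

-- ===== VERDICT (by name: the statement is the Claim_ definition above) =====
theorem solve_spec : Claim_equal_solve := by
  intro b c d _
  unfold Spec_solve
  have hP : (0:Int) < 2^61 := by positivity
  have hBlt : (b % 2^61).toNat < 2^61 := by have := Int.emod_lt_of_pos b hP; omega
  have hClt : (c % 2^61).toNat < 2^61 := by have := Int.emod_lt_of_pos c hP; omega
  have hDlt : (d % 2^61).toNat < 2^61 := by have := Int.emod_lt_of_pos d hP; omega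
  have hb0 : 0 ≤ b % 2^61 := Int.emod_nonneg _ (by norm_num)
  have hc0 : 0 ≤ c % 2^61 := Int.emod_nonneg _ (by norm_num)
  have hd0 : 0 ≤ d % 2^61 := Int.emod_nonneg _ (by norm_num)
  have hXlt : (b % 2^61).toNat ^^^ (d % 2^61).toNat < 2^61 := Nat.xor_lt_two_pow hBlt hDlt
  have hZle : ((b % 2^61).toNat ^^^ (d % 2^61).toNat) &&& ((b % 2^61).toNat ^^^ (c % 2^61).toNat)
      ≤ (b % 2^61).toNat ^^^ (d % 2^61).toNat := Nat.and_le_left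
  -- A side: the loop computes the masked closed form
  have hA : solve b c d =
      if ((b % 2^61).toNat ^^^ (d % 2^61).toNat) &&& ((b % 2^61).toNat ^^^ (c % 2^61).toNat) = 0
      then (((b % 2^61).toNat ^^^ (d % 2^61).toNat : Nat) : Int) else -1 := by
    show solve_go b c d (List.range BIT_NUM) 0 = _
    rw [show List.range BIT_NUM = List.range' 0 61 from List.range_eq_range']
    rw [loop_eq b c d (b % 2^61).toNat (c % 2^61).toNat (d % 2^61).toNat
          (fun i h => band_shift_one b i h) (fun i h => band_shift_one c i h)
          (fun i h => band_shift_one d i h) 61 0 (by omega) 0]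
    simp only [pow_zero, Nat.div_one, zero_add, mul_one]
    rw [Nat.mod_eq_of_lt (by omega), Nat.mod_eq_of_lt hXlt]
  -- B side
  have hmask : (((1:Nat) <<< BIT_NUM : Nat) : Int) - 1 = 2^61 - 1 := by
    norm_num [Nat.shiftLeft_eq, BIT_NUM]
  have hB : solve_alt b c d =
      if ((b % 2^61).toNat ^^^ (d % 2^61).toNat) &&& ((b % 2^61).toNat ^^^ (c % 2^61).toNat) = 0
      then (((b % 2^61).toNat ^^^ (d % 2^61).toNat : Nat) : Int) else -1 := by
    simp only [solve_alt]
    rw [hmask, band_mask b 61, band_mask c 61, band_mask d 61,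
        ← Int.toNat_of_nonneg hb0, ← Int.toNat_of_nonneg hc0, ← Int.toNat_of_nonneg hd0,
        PySem.Int.bxor_natCast, PySem.Int.bxor_natCast, PySem.Int.band_natCast]
    simp only [Int.toNat_natCast]
    by_cases hZ : ((b % 2^61).toNat ^^^ (d % 2^61).toNat) &&& ((b % 2^61).toNat ^^^ (c % 2^61).toNat) = 0
    · rw [if_neg (by simpa using hZ), if_pos hZ]
    · rw [if_pos (by simpa using hZ), if_neg hZ]
  rw [hA, hB]
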